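-- pv_equiv track=rewrite | github.com/bharathkumar43/Meeting_MOMs | app/meeting_filter.py | parse_vtt_transcript
-- ===== SOURCE A (Python) =====
-- def parse_vtt_transcript(vtt_text):
--     """
--     Parse a WebVTT transcript into structured entries.
--     Returns a list of dicts with speaker, timestamp, and text.
--     """
--     entries = []
--     lines = vtt_text.strip().split("\n")
--     current_entry = {}
--
--     i = 0
--     while i < len(lines):
--         line = lines[i].strip()
--
--         if "-->" in line:
--             current_entry["timestamp"] = line
--             i += 1
--             text_lines = []
--             while i < len(lines) and lines[i].strip():
--                 text_line = lines[i].strip()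
--                 # VTT speaker format: <v Speaker Name>text</v>
--                 if text_line.startswith("<v ") and ">" in text_line:
--                     speaker_end = text_line.index(">")
--                     speaker = text_line[3:speaker_end]
--                     text = text_line[speaker_end + 1:].replace("</v>", "").strip()
--                     current_entry["speaker"] = speaker
--                     text_lines.append(text)
--                 else:
--                     text_lines.append(text_line)
--                 i += 1
--
--             current_entry["text"] = " ".join(text_lines)
--             if current_entry.get("text"):
--                 entries.append(current_entry)
--             current_entry = {}
--         else:
--             i += 1
--
--     return entries
-- ===== SOURCE B (Python) =====
-- def _parse_line(l):
--     """'<v Speaker>text</v>' -> (speaker, cleaned text); otherwise (None, line)."""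
--     if l.startswith("<v ") and ">" in l:
--         k = l.index(">")
--         return l[3:k], l[k + 1:].replace("</v>", "").strip()
--     return None, l
--
--
-- def _split_blocks(lines):
--     """Split a list of (already stripped) lines into maximal runs of non-empty lines."""
--     blocks = []
--     i = 0
--     n = len(lines)
--     while i < n:
--         if not lines[i]:
--             i += 1
--             continue
--         j = i
--         while j < n and lines[j]:
--             j += 1
--         blocks.append(lines[i:j])
--         i = j
--     return blocks
--
--
-- def _parse_block(block):
--     """Turn one block into an entry dict, or None if it has no cue/no text."""
--     ts_idx = None
--     for j, l in enumerate(block):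
--         if "-->" in l:
--             ts_idx = j
--             break
--     if ts_idx is None:
--         return None
--     speaker = None
--     texts = []
--     for l in block[ts_idx + 1:]:
--         sp, txt = _parse_line(l)
--         if sp is not None:
--             speaker = sp
--         texts.append(txt)
--     text = " ".join(texts)
--     if not text:
--         return None
--     entry = {"timestamp": block[ts_idx]}
--     if speaker is not None:
--         entry["speaker"] = speaker
--     entry["text"] = text
--     return entry
--
--
-- def parse_vtt_transcript(vtt_text):
--     lines = [l.strip() for l in vtt_text.strip().split("\n")]
--     entries = []
--     for b in _split_blocks(lines):
--         e = _parse_block(b)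
--         if e is not None:
--             entries.append(e)
--     return entries
-- ===== Notes on version B (the rewrite author's own statement) =====
-- stated objective: alternative
-- what changed: A's single stateful index scan (outer while with a nested text-consuming while mutating a shared current_entry dict) is re-decomposed into three small passes: strip lines once, split them into maximal non-blank blocks, and parse each block independently (first '-->' line is the timestamp, the lines after it are folded into speaker/text).
import Mathlib
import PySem

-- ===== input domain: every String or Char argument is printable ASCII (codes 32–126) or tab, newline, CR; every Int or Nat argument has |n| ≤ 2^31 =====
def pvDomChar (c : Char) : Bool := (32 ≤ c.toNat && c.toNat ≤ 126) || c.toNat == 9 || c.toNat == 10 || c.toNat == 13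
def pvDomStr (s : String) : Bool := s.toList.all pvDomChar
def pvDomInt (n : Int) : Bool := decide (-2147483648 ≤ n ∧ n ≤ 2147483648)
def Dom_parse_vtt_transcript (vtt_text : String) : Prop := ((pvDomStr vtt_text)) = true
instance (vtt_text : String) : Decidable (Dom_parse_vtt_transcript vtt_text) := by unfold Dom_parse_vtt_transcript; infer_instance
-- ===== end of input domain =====

-- B re-decomposes A's stateful index scan into blank-line block splitting plus a per-block parser
-- (objective: alternative decomposition, same asymptotic cost); return values proved equal on all inputs.

-- ===== PORT A =====
-- inner while loop: consumes lines while lines[i].strip() is non-empty; state = (remaining lines, text_lines, current_entry)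
def pvA_inner : List String → List String → PySem.Dict String String →
    List String × List String × PySem.Dict String String
  | [], texts, e => ([], texts, e)
  | l :: rest, texts, e =>
    if PySem.Str.strip l ≠ "" then
      let t := PySem.Str.strip l
      if PySem.Str.startswith t "<v " && PySem.Str.isIn ">" t then
        -- t.index(">") cannot raise here ('>' ∈ t is guarded), so it equals Str.find (exact)
        let k := PySem.Str.find t ">"
        let speaker := PySem.Str.slice t (some 3) (some k)
        let txt := PySem.Str.strip (PySem.Str.replace (PySem.Str.slice t (some (k + 1)) none) "</v>" "")
        pvA_inner rest (texts ++ [txt]) (e.insert "speaker" speaker)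
      else
        pvA_inner rest (texts ++ [t]) e
    else
      (l :: rest, texts, e)

-- needed by pvA_outer's termination proof
theorem pvA_inner_fst_length : ∀ (ls texts : List String) (e : PySem.Dict String String),
    (pvA_inner ls texts e).1.length ≤ ls.length := by
  intro ls
  induction ls with
  | nil => intro texts e; simp [pvA_inner]
  | cons l rest ih =>
    intro texts e
    simp only [pvA_inner]
    split
    · split
      · exact le_trans (ih _ _) (by simp)
      · exact le_trans (ih _ _) (by simp)
    · simp

-- outer while loop over the line index
def pvA_outer : List String → List (PySem.Dict String String) → List (PySem.Dict String String)
  | [], entries => entries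
  | l :: rest, entries =>
    let line := PySem.Str.strip l
    if PySem.Str.isIn "-->" line then
      let r := pvA_inner rest [] (PySem.Dict.empty.insert "timestamp" line)
      let text := PySem.Str.join " " r.2.1
      let e := r.2.2.insert "text" text
      pvA_outer r.1 (if PySem.Dict.getD e "text" "" ≠ "" then entries ++ [e] else entries)
    else
      pvA_outer rest entries
termination_by ls _ => ls.length
decreasing_by
  · have h := pvA_inner_fst_length rest [] (PySem.Dict.empty.insert "timestamp" (PySem.Str.strip l))
    simpa using Nat.lt_succ_of_le h
  · simp

def parse_vtt_transcript (vtt_text : String) : List (List (String × String)) :=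
  (pvA_outer ((PySem.Str.split? (PySem.Str.strip vtt_text) "\n").getD []) []).map PySem.Dict.items

-- ===== PORT B =====
-- _parse_line: '<v Speaker>text</v>' -> (some speaker, cleaned text); otherwise (none, line)
def pvB_line (l : String) : Option String × String :=
  if PySem.Str.startswith l "<v " && PySem.Str.isIn ">" l then
    let k := PySem.Str.find l ">"
    (some (PySem.Str.slice l (some 3) (some k)),
     PySem.Str.strip (PySem.Str.replace (PySem.Str.slice l (some (k + 1)) none) "</v>" ""))
  else
    (none, l)

-- _split_blocks: maximal runs of non-empty (already stripped) lines
def pvB_splitBlocks : List String → List (List String)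
  | [] => []
  | l :: rest =>
    if l = "" then
      pvB_splitBlocks rest
    else
      (l :: rest.takeWhile (fun x => x ≠ "")) :: pvB_splitBlocks (rest.dropWhile (fun x => x ≠ ""))
termination_by ls => ls.length
decreasing_by
  · simp
  · have h := List.length_dropWhile_le (fun x => decide (x ≠ "")) rest
    simpa using Nat.lt_succ_of_le h

-- the enumerate-and-break search for the first '-->' line, returning it with the lines after it
def pvB_findCue : List String → Option (String × List String)
  | [] => none
  | l :: rest => if PySem.Str.isIn "-->" l then some (l, rest) else pvB_findCue rest

-- speaker update: last some wins
def pvB_spk (st : Option String) (l : String) : Option String :=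
  match (pvB_line l).1 with
  | some s => some s
  | none => st

def pvB_parseBlock (block : List String) : Option (PySem.Dict String String) :=
  match pvB_findCue block with
  | none => none
  | some (ts, tail) =>
    let st := tail.foldl (fun (st : Option String × List String) l =>
      (pvB_spk st.1 l, st.2 ++ [(pvB_line l).2])) (none, [])
    let text := PySem.Str.join " " st.2
    if text = "" then none
    else
      let e := PySem.Dict.empty.insert "timestamp" ts
      let e := match st.1 with
        | some s => e.insert "speaker" s
        | none => e
      some (e.insert "text" text)

def parse_vtt_transcript_alt (vtt_text : String) : List (List (String × String)) :=
  let lines := ((PySem.Str.split? (PySem.Str.strip vtt_text) "\n").getD []).map PySem.Str.strip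
  ((pvB_splitBlocks lines).foldl
    (fun acc b => match pvB_parseBlock b with | some e => acc ++ [e] | none => acc) []).map PySem.Dict.items

-- ===== PRECONDITION & SPEC =====
def Spec_parse_vtt_transcript (vtt_text : String) (out : List (List (String × String))) : Prop := out = parse_vtt_transcript_alt vtt_text
instance (vtt_text : String) (out : List (List (String × String))) : Decidable (Spec_parse_vtt_transcript vtt_text out) := by unfold Spec_parse_vtt_transcript; infer_instance

-- ===== CLAIM (what is proved, stated in full; the proofs are below) =====
def Claim_equal_parse_vtt_transcript : Prop := ∀ (vtt_text : String), Dom_parse_vtt_transcript vtt_text → Spec_parse_vtt_transcript vtt_text (parse_vtt_transcript vtt_text)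

-- ===== LEMMAS AND PROOFS =====

-- raw-line predicate: the line survives stripping
def pvP (l : String) : Bool := PySem.Str.strip l ≠ ""

-- the dict update A's inner loop performs per stripped line
def pvDictUpd (e : PySem.Dict String String) (t : String) : PySem.Dict String String :=
  match (pvB_line t).1 with
  | some s => e.insert "speaker" s
  | none => e

-- apply an optional speaker to a dict
def pvH (d : PySem.Dict String String) (st : Option String) : PySem.Dict String String :=
  match st with
  | some s => d.insert "speaker" s
  | none => d

theorem pvA_inner_spec : ∀ (ls texts : List String) (e : PySem.Dict String String),
    pvA_inner ls texts e =
      (ls.dropWhile pvP,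
       texts ++ (ls.takeWhile pvP).map (fun l => (pvB_line (PySem.Str.strip l)).2),
       ((ls.takeWhile pvP).map PySem.Str.strip).foldl pvDictUpd e) := by
  intro ls
  induction ls with
  | nil => intro texts e; simp [pvA_inner]
  | cons l rest ih =>
    intro texts e
    by_cases hb : PySem.Str.strip l = ""
    · have hP : pvP l = false := by simp [pvP, hb]
      simp [pvA_inner, hb, hP]
    · have hP : pvP l = true := by simp [pvP, hb]
      simp only [pvA_inner, if_pos (show PySem.Str.strip l ≠ "" from hb),
        List.takeWhile_cons, hP, if_true, List.dropWhile_cons, List.map_cons, List.foldl_cons]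
      by_cases hc : (PySem.Str.startswith (PySem.Str.strip l) "<v " && PySem.Str.isIn ">" (PySem.Str.strip l)) = true
      · have hline : pvB_line (PySem.Str.strip l) =
            (some (PySem.Str.slice (PySem.Str.strip l) (some 3) (some (PySem.Str.find (PySem.Str.strip l) ">"))),
             PySem.Str.strip (PySem.Str.replace
               (PySem.Str.slice (PySem.Str.strip l) (some (PySem.Str.find (PySem.Str.strip l) ">" + 1)) none) "</v>" "")) := by
          unfold pvB_line
          rw [if_pos hc]
        rw [if_pos hc, ih]
        simp [hline, pvDictUpd]
      · have hline : pvB_line (PySem.Str.strip l) = (none, PySem.Str.strip l) := by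
          unfold pvB_line
          rw [if_neg hc]
        rw [if_neg hc, ih]
        simp [hline, pvDictUpd]

theorem pvDictFold : ∀ (run : List String) (d : PySem.Dict String String) (st : Option String),
    run.foldl pvDictUpd (pvH d st) = pvH d (run.foldl pvB_spk st) := by
  intro run
  induction run with
  | nil => intro d st; simp
  | cons t rs ih =>
    intro d st
    simp only [List.foldl_cons]
    have hstep : pvDictUpd (pvH d st) t = pvH d (pvB_spk st t) := by
      unfold pvDictUpd pvB_spk pvH
      cases hp : (pvB_line t).1 <;> cases st <;> simp [PySem.Dict.insert_insert_self]
    rw [hstep, ih]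

theorem pvB_parseBlock_skip (l : String) (b : List String) (h : PySem.Str.isIn "-->" l = false) :
    pvB_parseBlock (l :: b) = pvB_parseBlock b := by
  have h1 : pvB_findCue (l :: b) = pvB_findCue b := by
    unfold pvB_findCue
    rw [if_neg (by simpa using h)]
    cases b <;> rfl
  simp only [pvB_parseBlock, h1]

theorem pvB_parseBlock_cue (ts : String) (tail : List String) (h : PySem.Str.isIn "-->" ts = true) :
    pvB_parseBlock (ts :: tail) =
      (let text := PySem.Str.join " " (tail.map (fun l => (pvB_line l).2))
       if text = "" then none
       else some ((pvH (PySem.Dict.empty.insert "timestamp" ts) (tail.foldl pvB_spk none)).insert "text" text)) := by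
  have h1 : pvB_findCue (ts :: tail) = some (ts, tail) := by
    unfold pvB_findCue
    rw [if_pos h]
  simp only [pvB_parseBlock, h1]
  rw [PySem.List.foldl_prod_mk pvB_spk (fun s e => s ++ [(pvB_line e).2]) tail none []]
  rw [PySem.List.foldl_append_singleton_eq_map]
  simp [pvH]

theorem pvBFold_eq_filterMap : ∀ (bs : List (List String)) (acc : List (PySem.Dict String String)),
    bs.foldl (fun acc b => match pvB_parseBlock b with | some e => acc ++ [e] | none => acc) acc
      = acc ++ bs.filterMap pvB_parseBlock := by
  intro bs
  induction bs with
  | nil => intro acc; simp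
  | cons b bs ih =>
    intro acc
    simp only [List.foldl_cons, List.filterMap_cons]
    cases hb : pvB_parseBlock b <;> simp [hb, ih]

theorem pvSkipBlock (t : String) (ms : List String) (ht : t ≠ "") (hc : PySem.Str.isIn "-->" t = false) :
    (pvB_splitBlocks (t :: ms)).filterMap pvB_parseBlock = (pvB_splitBlocks ms).filterMap pvB_parseBlock := by
  have hnone : pvB_parseBlock [t] = none := by
    have h1 : pvB_findCue [t] = none := by
      unfold pvB_findCue
      rw [if_neg (by simpa using hc)]
      rfl
    simp [pvB_parseBlock, h1]
  cases ms with
  | nil => simp [pvB_splitBlocks, ht, hnone]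
  | cons m ms' =>
    by_cases hm : m = ""
    · subst hm
      have h1 : pvB_splitBlocks (t :: "" :: ms') = [t] :: pvB_splitBlocks ("" :: ms') := by
        simp [pvB_splitBlocks, ht]
      rw [h1, List.filterMap_cons, hnone]
    · have h1 : pvB_splitBlocks (t :: m :: ms') =
          (t :: m :: ms'.takeWhile (fun x => x ≠ "")) :: pvB_splitBlocks (ms'.dropWhile (fun x => x ≠ "")) := by
        simp [pvB_splitBlocks, ht, hm]
      have h2 : pvB_splitBlocks (m :: ms') =
          (m :: ms'.takeWhile (fun x => x ≠ "")) :: pvB_splitBlocks (ms'.dropWhile (fun x => x ≠ "")) := by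
        simp [pvB_splitBlocks, hm]
      rw [h1, h2, List.filterMap_cons, List.filterMap_cons, pvB_parseBlock_skip t _ hc]

theorem pvMain : ∀ (n : Nat) (ls : List String) (entries : List (PySem.Dict String String)),
    ls.length ≤ n →
    pvA_outer ls entries = entries ++ (pvB_splitBlocks (ls.map PySem.Str.strip)).filterMap pvB_parseBlock := by
  intro n
  induction n with
  | zero =>
    intro ls entries h
    have hnil : ls = [] := List.eq_nil_of_length_eq_zero (Nat.le_zero.mp h)
    subst hnil
    simp [pvA_outer, pvB_splitBlocks]
  | succ n ih =>
    intro ls entries h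
    match ls with
    | [] => simp [pvA_outer, pvB_splitBlocks]
    | l :: rest =>
      simp only [pvA_outer]
      by_cases hc : PySem.Str.isIn "-->" (PySem.Str.strip l) = true
      · have hne : PySem.Str.strip l ≠ "" := by
          intro h0
          rw [h0] at hc
          exact absurd hc (by decide)
        rw [if_pos hc, pvA_inner_spec]
        simp only [PySem.Dict.getD_insert_self, List.nil_append]
        have hlen : (rest.dropWhile pvP).length ≤ n := by
          have := List.length_dropWhile_le pvP rest
          simp at h
          omega
        rw [ih _ _ hlen]
        -- B side
        simp only [List.map_cons]
        rw [show pvB_splitBlocks (PySem.Str.strip l :: rest.map PySem.Str.strip)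
              = (PySem.Str.strip l :: (rest.map PySem.Str.strip).takeWhile (fun x => x ≠ ""))
                :: pvB_splitBlocks ((rest.map PySem.Str.strip).dropWhile (fun x => x ≠ "")) from by
          simp [pvB_splitBlocks, hne]]
        have htw : (rest.map PySem.Str.strip).takeWhile (fun x => x ≠ "")
            = (rest.takeWhile pvP).map PySem.Str.strip := by
          rw [List.takeWhile_map]
          rfl
        have hdw : (rest.map PySem.Str.strip).dropWhile (fun x => x ≠ "")
            = (rest.dropWhile pvP).map PySem.Str.strip := by
          rw [List.dropWhile_map]
          rfl
        have hdict : ((rest.takeWhile pvP).map PySem.Str.strip).foldl pvDictUpd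
              (PySem.Dict.empty.insert "timestamp" (PySem.Str.strip l))
            = pvH (PySem.Dict.empty.insert "timestamp" (PySem.Str.strip l))
                (((rest.takeWhile pvP).map PySem.Str.strip).foldl pvB_spk none) := by
          exact pvDictFold _ _ none
        rw [htw, hdw, List.filterMap_cons, pvB_parseBlock_cue _ _ hc, hdict]
        simp only [List.map_map, Function.comp_def]
        by_cases htext : PySem.Str.join " " ((rest.takeWhile pvP).map (fun l => (pvB_line (PySem.Str.strip l)).2)) = ""
        · simp [htext]
        · simp [htext]
      · rw [if_neg hc]
        have hlen : rest.length ≤ n := by simp at h; omega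
        rw [ih _ _ hlen]
        simp only [List.map_cons]
        by_cases hb : PySem.Str.strip l = ""
        · rw [hb]
          rw [show pvB_splitBlocks ("" :: rest.map PySem.Str.strip)
                = pvB_splitBlocks (rest.map PySem.Str.strip) from by simp [pvB_splitBlocks]]
        · rw [pvSkipBlock _ _ hb (by simpa using hc)]

-- ===== VERDICT (by name: the statement is the Claim_ definition above) =====
theorem parse_vtt_transcript_spec : Claim_equal_parse_vtt_transcript := by
  intro vtt_text _
  unfold Spec_parse_vtt_transcript parse_vtt_transcript parse_vtt_transcript_alt
  simp only [pvBFold_eq_filterMap]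
  rw [pvMain (((PySem.Str.split? (PySem.Str.strip vtt_text) "\n").getD []).map PySem.Str.strip).length _ [] (by simp)]
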